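-- pv_equiv track=rewrite | github.com/linhdvu14/cp-sols | sols/CodeForces/1846_d3/C_Rudolf_and_the_Another_Competition.py | solve
-- ===== SOURCE A (Python) =====
-- def solve(N, M, H, A):
--     def f(A):
--         A.sort()
--         s = t = p = 0
--         for a in A:
--             if t + a > H: break
--             t += a
--             p += t
--             s += 1
--         return s, p
--
--     B = []
--     for i, a in enumerate(A):
--         s, p = f(a)
--         B.append((s, -p, -i))
--     B.sort(reverse=True)
--
--     for r, (_, _, i) in enumerate(B):
--         if i == 0:
--             return r + 1
-- ===== SOURCE B (Python) =====
-- def solve(N, M, H, A):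
--     def f(a):
--         a.sort()
--         s = t = p = 0
--         for x in a:
--             if t + x > H:
--                 break
--             t += x
--             p += t
--             s += 1
--         return s, p
--
--     s0, p0 = f(A[0])
--     better = 0
--     for a in A:
--         s, p = f(a)
--         if s > s0 or (s == s0 and p < p0):
--             better += 1
--     return better + 1
-- ===== Notes on version B (the rewrite author's own statement) =====
-- stated objective: simpler
-- what changed: Keeps the per-participant greedy scorer f but replaces A's build-a-list / reverse-sort / scan-for-index ranking with a single counting pass: rank = 1 + number of participants strictly better than participant 0 (more solved, or equal solved with smaller penalty).
-- outside the precondition, e.g. on solve(1, 1, 5, []): A returns None, B raises IndexError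
import Mathlib
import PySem

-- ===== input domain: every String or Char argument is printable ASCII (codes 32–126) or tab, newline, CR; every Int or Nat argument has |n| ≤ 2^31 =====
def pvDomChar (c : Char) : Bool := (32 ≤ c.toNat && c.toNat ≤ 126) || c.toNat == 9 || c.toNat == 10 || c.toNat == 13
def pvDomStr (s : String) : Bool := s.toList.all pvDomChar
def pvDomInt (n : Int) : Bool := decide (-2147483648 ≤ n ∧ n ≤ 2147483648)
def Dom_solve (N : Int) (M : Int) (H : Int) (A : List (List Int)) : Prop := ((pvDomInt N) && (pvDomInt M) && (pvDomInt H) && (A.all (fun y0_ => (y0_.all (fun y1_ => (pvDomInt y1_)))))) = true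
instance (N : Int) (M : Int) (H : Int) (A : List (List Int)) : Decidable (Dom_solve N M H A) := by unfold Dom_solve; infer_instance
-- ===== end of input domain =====

-- B replaces A's build-list/reverse-sort/scan ranking by a single counting pass
-- (rank = 1 + number of strictly better participants); both sort each time list
-- in place (the in-place mutation of A's inner lists is shared by A and B; the
-- equivalence proved here is about the return value).

-- ===== PORT A =====
-- A's helper f: after sorting the times, greedily accumulate (solved, penalty)
def fLoop (H : Int) : List Int → Int → Int → Int → Int × Int
  | [], s, _, p => (s, p)
  | a :: rest, s, t, p =>
    if t + a > H then (s, p) else fLoop H rest (s + 1) (t + a) (p + (t + a))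

def fScore (H : Int) (a : List Int) : Int × Int :=
  fLoop H (PySem.List.sorted a (fun x => x) false) 0 0 0

-- hand port of Python's tuple '>' on int triples (exact: lexicographic)
def tripGt (x y : Int × Int × Int) : Bool :=
  decide (x.1 > y.1) || (x.1 == y.1 && (decide (x.2.1 > y.2.1) || (x.2.1 == y.2.1 && decide (x.2.2 > y.2.2))))

-- hand port of B.sort(reverse=True): stable descending insertion sort; exact here
-- because the third components -i are pairwise distinct, so no ties ever arise
def insertDesc (x : Int × Int × Int) : List (Int × Int × Int) → List (Int × Int × Int)
  | [] => [x]
  | y :: ys => if tripGt x y then x :: y :: ys else y :: insertDesc x ys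

def sortDesc (L : List (Int × Int × Int)) : List (Int × Int × Int) :=
  L.foldl (fun acc x => insertDesc x acc) []

def buildB (H : Int) (A : List (List Int)) : List (Int × Int × Int) :=
  (PySem.List.enumerate A).map (fun q => ((fScore H q.2).1, -(fScore H q.2).2, -q.1))

def findRank : List (Int × Int × Int) → Int → Int
  | [], _ => 0          -- Python falls off the function (None) here; excluded by Pre_solve
  | x :: rest, r => if x.2.2 == 0 then r + 1 else findRank rest (r + 1)

def solve (N : Int) (M : Int) (H : Int) (A : List (List Int)) : Int :=
  findRank (sortDesc (buildB H A)) 0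

-- ===== PORT B =====
def solve_alt (N : Int) (M : Int) (H : Int) (A : List (List Int)) : Int :=
  match A with
  | [] => 0             -- Source B raises IndexError on A[0]; excluded by Pre_solve
  | a0 :: _ =>
    let sp0 := fScore H a0
    A.foldl (fun c a =>
      let sp := fScore H a
      if decide (sp.1 > sp0.1) || (sp.1 == sp0.1 && decide (sp.2 < sp0.2)) then c + 1 else c) 0 + 1

-- ===== PRECONDITION & SPEC =====
-- Pre_ excludes only A = [], on which the Python A runs off the end and returns
-- None (not an int) and B raises IndexError.
def Pre_solve (N : Int) (M : Int) (H : Int) (A : List (List Int)) : Prop := A ≠ []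
instance (N : Int) (M : Int) (H : Int) (A : List (List Int)) : Decidable (Pre_solve N M H A) := by unfold Pre_solve; infer_instance
def pvWitness_solve : Int × Int × Int × List (List Int) := (2, 2, 10, [[3, 1], [2, 2]])

def Spec_solve (N : Int) (M : Int) (H : Int) (A : List (List Int)) (out : Int) : Prop := out = solve_alt N M H A
instance (N : Int) (M : Int) (H : Int) (A : List (List Int)) (out : Int) : Decidable (Spec_solve N M H A out) := by unfold Spec_solve; infer_instance

-- ===== CLAIM (what is proved, stated in full; the proofs are below) =====
def Claim_equal_solve : Prop := ∀ (N : Int) (M : Int) (H : Int) (A : List (List Int)), Dom_solve N M H A → Pre_solve N M H A → Spec_solve N M H A (solve N M H A)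

-- ===== LEMMAS AND PROOFS =====

theorem tripGt_irrefl (a : Int × Int × Int) : tripGt a a = false := by
  simp [tripGt]

theorem tripGt_total {a b : Int × Int × Int} (h1 : tripGt a b = false)
    (h2 : tripGt b a = false) : a = b := by
  obtain ⟨a1, a2, a3⟩ := a
  obtain ⟨b1, b2, b3⟩ := b
  simp [tripGt] at h1 h2
  have : a1 = b1 ∧ a2 = b2 ∧ a3 = b3 := by omega
  simp [this.1, this.2.1, this.2.2]

theorem tripGt_le_trans {z y x : Int × Int × Int} (h1 : tripGt z y = false)
    (h2 : tripGt x y = true) : tripGt z x = false := by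
  obtain ⟨a1, a2, a3⟩ := z
  obtain ⟨b1, b2, b3⟩ := y
  obtain ⟨c1, c2, c3⟩ := x
  simp [tripGt] at *
  omega

theorem mem_insertDesc {z x : Int × Int × Int} {ys : List (Int × Int × Int)} :
    z ∈ insertDesc x ys ↔ z = x ∨ z ∈ ys := by
  induction ys with
  | nil => simp [insertDesc]
  | cons y ys ih =>
    simp only [insertDesc]
    split
    · simp
    · simp [ih]; tauto

theorem insertDesc_perm (x : Int × Int × Int) (ys : List (Int × Int × Int)) :
    (insertDesc x ys).Perm (x :: ys) := by
  induction ys with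
  | nil => simp [insertDesc]
  | cons y ys ih =>
    simp only [insertDesc]
    split
    · exact List.Perm.refl _
    · exact ((ih.cons y).trans (List.Perm.swap x y ys))

theorem sortDesc_perm_aux (L acc : List (Int × Int × Int)) :
    (L.foldl (fun acc x => insertDesc x acc) acc).Perm (acc ++ L) := by
  induction L generalizing acc with
  | nil => simp
  | cons x L ih =>
    simp only [List.foldl_cons]
    refine (ih _).trans ?_
    refine (List.Perm.append_right L (insertDesc_perm x acc)).trans ?_
    exact List.perm_middle.symm.trans (by simpa using (List.Perm.refl (acc ++ x :: L)))

theorem sortDesc_perm (L : List (Int × Int × Int)) : (sortDesc L).Perm L := by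
  simpa using sortDesc_perm_aux L []

theorem insertDesc_pairwise {x : Int × Int × Int} {ys : List (Int × Int × Int)}
    (h : ys.Pairwise (fun a b => tripGt b a = false)) :
    (insertDesc x ys).Pairwise (fun a b => tripGt b a = false) := by
  induction ys with
  | nil => simp [insertDesc]
  | cons y ys ih =>
    rw [List.pairwise_cons] at h
    simp only [insertDesc]
    split
    · rename_i hxy
      refine List.pairwise_cons.2 ⟨?_, List.pairwise_cons.2 h⟩
      intro z hz
      rcases List.mem_cons.1 hz with rfl | hz
      · exact tripGt_le_trans (by simpa using tripGt_irrefl z) hxy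
      · exact tripGt_le_trans (h.1 z hz) hxy
    · rename_i hxy
      refine List.pairwise_cons.2 ⟨?_, ih h.2⟩
      intro z hz
      rcases mem_insertDesc.1 hz with rfl | hz
      · simpa using hxy
      · exact h.1 z hz

theorem sortDesc_sorted_aux (L acc : List (Int × Int × Int))
    (h : acc.Pairwise (fun a b => tripGt b a = false)) :
    (L.foldl (fun acc x => insertDesc x acc) acc).Pairwise (fun a b => tripGt b a = false) := by
  induction L generalizing acc with
  | nil => exact h
  | cons x L ih => exact ih _ (insertDesc_pairwise h)

theorem sortDesc_sorted (L : List (Int × Int × Int)) :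
    (sortDesc L).Pairwise (fun a b => tripGt b a = false) :=
  sortDesc_sorted_aux L [] (by simp)

theorem findRank_append (x : Int × Int × Int) (hx0 : x.2.2 = 0)
    (pre post : List (Int × Int × Int)) (hpre : ∀ y ∈ pre, y.2.2 ≠ 0) :
    ∀ r : Int, findRank (pre ++ x :: post) r = r + pre.length + 1 := by
  induction pre with
  | nil => intro r; simp [findRank, hx0]
  | cons y pre ih =>
    intro r
    have hy : y.2.2 ≠ 0 := hpre y (by simp)
    simp only [List.cons_append, findRank, beq_iff_eq, hy, if_false]
    rw [ih (fun z hz => hpre z (by simp [hz])) (r + 1)]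
    simp [List.length_cons]
    ring

theorem countP_false_of_all (p : (Int × Int × Int) → Bool) (l : List (Int × Int × Int))
    (h : ∀ y ∈ l, p y = false) : l.countP p = 0 := by
  induction l with
  | nil => simp
  | cons y l ih =>
    rw [List.countP_cons]
    simp [h y (by simp), ih (fun z hz => h z (by simp [hz]))]

theorem countP_true_of_all (p : (Int × Int × Int) → Bool) (l : List (Int × Int × Int))
    (h : ∀ y ∈ l, p y = true) : l.countP p = l.length := by
  induction l with
  | nil => simp
  | cons y l ih =>
    rw [List.countP_cons]
    simp [h y (by simp), ih (fun z hz => h z (by simp [hz]))]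

-- rank of the unique zero-third element in the descending sort
-- = number of strictly greater elements, plus one
theorem rank_eq_count (x : Int × Int × Int) (tail : List (Int × Int × Int))
    (hx0 : x.2.2 = 0) (htail : ∀ y ∈ tail, y.2.2 ≠ 0) :
    findRank (sortDesc (x :: tail)) 0 =
      ((x :: tail).countP (fun y => tripGt y x) : Int) + 1 := by
  have hperm := sortDesc_perm (x :: tail)
  have hsort := sortDesc_sorted (x :: tail)
  have hxmem : x ∈ sortDesc (x :: tail) := hperm.mem_iff.2 (by simp)
  obtain ⟨pre, post, hS⟩ := List.append_of_mem hxmem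
  have hxnot : x ∉ tail := fun h => htail x h hx0
  have hcount : (x :: tail).count x = 1 := by
    rw [List.count_cons_self, List.count_eq_zero.2 hxnot]
  have hScount : (sortDesc (x :: tail)).count x = 1 := by
    rw [hperm.count_eq]; exact hcount
  have hxpre : x ∉ pre ∧ x ∉ post := by
    by_contra h
    have : 2 ≤ (sortDesc (x :: tail)).count x := by
      rw [hS]
      rcases not_and_or.1 h with h' | h' <;> rw [not_not] at h'
      · obtain ⟨l1, l2, rfl⟩ := List.append_of_mem h'
        simp [List.count_append, List.count_cons_self]
        omega
      · obtain ⟨l1, l2, rfl⟩ := List.append_of_mem h'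
        simp [List.count_append, List.count_cons_self]
        omega
    omega
  -- every element of the whole list other than x has nonzero third component
  have hzero : ∀ y, y ∈ pre ∨ y ∈ post → y.2.2 ≠ 0 := by
    intro y hy
    have hyS : y ∈ sortDesc (x :: tail) := by
      rw [hS]; rcases hy with hy | hy <;> simp [hy]
    have hyL : y ∈ x :: tail := hperm.mem_iff.1 hyS
    rcases List.mem_cons.1 hyL with rfl | hyT
    · rcases hy with hy | hy
      · exact absurd hy hxpre.1
      · exact absurd hy hxpre.2
    · exact htail y hyT
  have hpairwise := hS ▸ hsort
  rw [List.pairwise_append] at hpairwise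
  obtain ⟨hpreP, hpostP, hcross⟩ := hpairwise
  rw [List.pairwise_cons] at hpostP
  -- pre elements are strictly greater than x
  have hpreGt : ∀ y ∈ pre, tripGt y x = true := by
    intro y hy
    have h1 : tripGt x y = false := hcross y hy x (by simp)
    by_contra h
    have h2 : tripGt y x = false := by
      cases hgt : tripGt y x
      · rfl
      · exact absurd hgt h
    exact hzero y (Or.inl hy) (tripGt_total h2 h1 ▸ hx0)
  -- post elements are not greater than x
  have hpostGt : ∀ y ∈ post, tripGt y x = false := hpostP.1
  -- compute the count over the sorted list
  have hcountS : (sortDesc (x :: tail)).countP (fun y => tripGt y x) = pre.length := by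
    rw [hS, List.countP_append, List.countP_cons]
    rw [countP_true_of_all _ _ hpreGt, countP_false_of_all _ _ hpostGt]
    simp [tripGt_irrefl]
  have hcountL : (x :: tail).countP (fun y => tripGt y x) = pre.length := by
    rw [← hperm.countP_eq]; exact hcountS
  rw [hS, findRank_append x hx0 pre post (fun y hy => hzero y (Or.inl hy)) 0, hcountL]
  ring

theorem foldl_count (p : List Int → Bool) (l : List (List Int)) :
    ∀ c : Int, l.foldl (fun c a => if p a then c + 1 else c) c = c + l.countP p := by
  induction l with
  | nil => intro c; simp
  | cons a l ih =>
    intro c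
    rw [List.foldl_cons, List.countP_cons]
    by_cases h : p a = true
    · rw [if_pos h, ih, h]; push_cast; simp; ring
    · rw [if_neg h, ih]; simp at h; simp [h]

theorem countP_enumerate (p : List Int → Bool) (l : List (List Int)) :
    ∀ s : Int, (PySem.List.enumerate l s).countP (fun q => p q.2) = l.countP p := by
  induction l with
  | nil => intro s; simp [PySem.List.enumerate_nil]
  | cons a l ih =>
    intro s
    rw [PySem.List.enumerate_cons, List.countP_cons, List.countP_cons, ih]

-- ===== VERDICT (by name: the statement is the Claim_ definition above) =====
theorem solve_spec : Claim_equal_solve := by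
  intro N M H A _ hpre
  unfold Spec_solve
  match A with
  | [] => exact absurd rfl hpre
  | a0 :: rest =>
    have hB : solve_alt N M H (a0 :: rest) =
        (a0 :: rest).foldl (fun c a =>
          if decide ((fScore H a).1 > (fScore H a0).1) ||
              ((fScore H a).1 == (fScore H a0).1 && decide ((fScore H a).2 < (fScore H a0).2))
          then c + 1 else c) 0 + 1 := rfl
    rw [hB]
    unfold solve buildB
    rw [PySem.List.enumerate_cons, List.map_cons]
    set sp0 := fScore H a0 with hsp0
    set x : Int × Int × Int := (sp0.1, -sp0.2, -(0 : Int)) with hx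
    set tail := ((PySem.List.enumerate rest (0 + 1)).map
        (fun q => ((fScore H q.2).1, -(fScore H q.2).2, -q.1))) with htl
    have hx0 : x.2.2 = 0 := by simp [hx]
    have htail : ∀ y ∈ tail, y.2.2 ≠ 0 := by
      intro y hy
      rw [htl, List.mem_map] at hy
      obtain ⟨q, hq, rfl⟩ := hy
      rw [PySem.List.mem_enumerate_iff] at hq
      obtain ⟨k, hk, rfl⟩ := hq
      simp only
      omega
    rw [rank_eq_count x tail hx0 htail]
    have hcond : ∀ y ∈ x :: tail,
        (tripGt y x = true ↔
          (decide (y.1 > sp0.1) || (y.1 == sp0.1 && decide (-y.2.1 < sp0.2))) = true) := by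
      intro y hy
      rcases List.mem_cons.1 hy with rfl | hy
      · simp only [tripGt, hx, Bool.or_eq_true, Bool.and_eq_true, decide_eq_true_eq,
          beq_iff_eq, gt_iff_lt]
        omega
      · rw [htl, List.mem_map] at hy
        obtain ⟨q, hq, rfl⟩ := hy
        rw [PySem.List.mem_enumerate_iff] at hq
        obtain ⟨k, hk, rfl⟩ := hq
        simp only [tripGt, hx, Bool.or_eq_true, Bool.and_eq_true, decide_eq_true_eq,
          beq_iff_eq, gt_iff_lt]
        omega
    rw [List.countP_congr hcond]
    have hback : (x :: tail).countP
        (fun y : Int × Int × Int =>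
          decide (y.1 > sp0.1) || (y.1 == sp0.1 && decide (-y.2.1 < sp0.2))) =
        ((PySem.List.enumerate (a0 :: rest)).map
          (fun q => ((fScore H q.2).1, -(fScore H q.2).2, -q.1))).countP
        (fun y : Int × Int × Int =>
          decide (y.1 > sp0.1) || (y.1 == sp0.1 && decide (-y.2.1 < sp0.2))) := by
      rw [PySem.List.enumerate_cons, List.map_cons]
    rw [hback, List.countP_map]
    have hmapcond : ((PySem.List.enumerate (a0 :: rest)).countP
        ((fun y : Int × Int × Int =>
          decide (y.1 > sp0.1) || (y.1 == sp0.1 && decide (-y.2.1 < sp0.2))) ∘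
          (fun q => ((fScore H q.2).1, -(fScore H q.2).2, -q.1)))) =
        ((PySem.List.enumerate (a0 :: rest)).countP
          (fun q : Int × List Int =>
            decide ((fScore H q.2).1 > sp0.1) ||
              ((fScore H q.2).1 == sp0.1 && decide ((fScore H q.2).2 < sp0.2)))) := by
      apply List.countP_congr
      intro q _
      simp only [Function.comp, Bool.or_eq_true, Bool.and_eq_true, decide_eq_true_eq,
        beq_iff_eq, gt_iff_lt]
      omega
    rw [hmapcond, countP_enumerate
      (fun a : List Int =>
        decide ((fScore H a).1 > sp0.1) ||
          ((fScore H a).1 == sp0.1 && decide ((fScore H a).2 < sp0.2))) (a0 :: rest) 0]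
    rw [foldl_count
      (fun a : List Int =>
        decide ((fScore H a).1 > sp0.1) ||
          ((fScore H a).1 == sp0.1 && decide ((fScore H a).2 < sp0.2))) (a0 :: rest) 0]
    simp
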